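-- pv_equiv track=rewrite | github.com/stefvnv/python3 | [3]Functional Programming/ex3_6.py | pCountZeros
-- ===== SOURCE A (Python) =====
-- def pCountZeros(list):
--     if len(list) == 0:
--         return 0
--     else:
--         first = list.pop(0)
--         if first == 0:
--             return 1 + pCountZeros(list)
--         else:
--             return 0 + pCountZeros(list)
-- ===== SOURCE B (Python) =====
-- def pCountZeros(list):
--     count = 0
--     while len(list) > 0:
--         first = list.pop(0)
--         if first == 0:
--             count += 1
--     return count
-- ===== Notes on version B (the rewrite author's own statement) =====
-- stated objective: alternative
-- what changed: Replaces A's recursion (one stack frame per element) with an iterative while-loop carrying an explicit counter; same front-pop consumption order, so the list is emptied as in A.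
import Mathlib
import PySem

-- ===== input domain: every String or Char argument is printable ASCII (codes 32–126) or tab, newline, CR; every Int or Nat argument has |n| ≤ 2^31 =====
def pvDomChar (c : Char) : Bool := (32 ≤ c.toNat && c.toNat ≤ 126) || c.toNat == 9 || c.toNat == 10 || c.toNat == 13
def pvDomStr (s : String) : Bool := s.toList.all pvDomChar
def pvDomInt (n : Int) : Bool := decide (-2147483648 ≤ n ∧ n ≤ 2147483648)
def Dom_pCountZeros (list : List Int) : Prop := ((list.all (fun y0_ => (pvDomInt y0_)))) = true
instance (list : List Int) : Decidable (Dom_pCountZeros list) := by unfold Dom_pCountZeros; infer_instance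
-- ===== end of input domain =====

-- B replaces A's recursion with an iterative loop and explicit counter; both
-- consume the list front-to-back (both Pythons empty the argument list; the
-- equivalence proved here is about the return value).

-- ===== PORT A =====
-- A: if empty return 0, else pop the front and recurse on the rest.
def pCountZeros (list : List Int) : Int :=
  match list with
  | [] => 0
  | first :: rest => if first = 0 then 1 + pCountZeros rest else 0 + pCountZeros rest

-- ===== PORT B =====
-- B: count := 0; while the list is nonempty pop the front, bump count on zero.
def pCountZerosLoop (count : Int) (list : List Int) : Int :=
  match list with
  | [] => count
  | first :: rest => pCountZerosLoop (if first = 0 then count + 1 else count) rest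

def pCountZeros_alt (list : List Int) : Int := pCountZerosLoop 0 list

-- ===== PRECONDITION & SPEC =====
def Spec_pCountZeros (list : List Int) (out : Int) : Prop := out = pCountZeros_alt list
instance (list : List Int) (out : Int) : Decidable (Spec_pCountZeros list out) := by unfold Spec_pCountZeros; infer_instance

-- ===== CLAIM (what is proved, stated in full; the proofs are below) =====
def Claim_equal_pCountZeros : Prop := ∀ (list : List Int), Dom_pCountZeros list → Spec_pCountZeros list (pCountZeros list)

-- ===== LEMMAS AND PROOFS =====
theorem pCountZerosLoop_acc (list : List Int) (count : Int) :
    pCountZerosLoop count list = count + pCountZerosLoop 0 list := by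
  induction list generalizing count with
  | nil => simp [pCountZerosLoop]
  | cons x xs ih =>
    simp only [pCountZerosLoop]
    rw [ih, ih (if x = 0 then 0 + 1 else 0)]
    split_ifs <;> ring

-- ===== VERDICT (by name: the statement is the Claim_ definition above) =====
theorem pCountZeros_eq (list : List Int) : pCountZeros list = pCountZeros_alt list := by
  unfold pCountZeros_alt
  induction list with
  | nil => simp [pCountZeros, pCountZerosLoop]
  | cons x xs ih =>
    simp only [pCountZeros, pCountZerosLoop]
    rw [pCountZerosLoop_acc xs (if x = 0 then 0 + 1 else 0), ih]
    split_ifs <;> ring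

theorem pCountZeros_spec : Claim_equal_pCountZeros :=
  fun list _ => pCountZeros_eq list
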